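-- pv_equiv track=rewrite | github.com/jinhk7/eaxm-topic | exam.py | abc2num
-- ===== SOURCE A (Python) =====
-- def abc2num(str):
--     str = str.replace('A', '1')
--     str = str.replace('B', '2')
--     str = str.replace('C', '3')
--     str = str.replace('D', '4')
--     str = str.replace('E', '5')
--     str = str.replace('F', '6')
--     str_num = ''
--     for i in list(str):
--         str_num += i + ','
--     str_num = str_num[:-1]
--     return str_num
-- ===== SOURCE B (Python) =====
-- def abc2num(str):
--     table = {'A': '1', 'B': '2', 'C': '3', 'D': '4', 'E': '5', 'F': '6'}
--     return ','.join(table.get(c, c) for c in str)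
-- ===== Notes on version B (the rewrite author's own statement) =====
-- stated objective: simpler
-- what changed: Six sequential full-string replace passes plus a manual append-and-trim-trailing-comma loop are collapsed into a single table-driven pass built with a comma join.
import Mathlib
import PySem

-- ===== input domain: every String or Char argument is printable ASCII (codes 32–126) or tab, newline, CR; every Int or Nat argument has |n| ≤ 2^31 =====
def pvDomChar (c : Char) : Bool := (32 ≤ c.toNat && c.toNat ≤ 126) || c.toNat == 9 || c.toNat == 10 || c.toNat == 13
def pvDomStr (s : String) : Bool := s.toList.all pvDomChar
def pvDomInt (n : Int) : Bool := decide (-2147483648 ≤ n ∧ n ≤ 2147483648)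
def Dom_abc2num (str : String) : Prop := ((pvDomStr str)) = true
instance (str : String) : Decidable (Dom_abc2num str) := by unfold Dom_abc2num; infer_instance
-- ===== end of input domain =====

-- B replaces A's six sequential full-string replace passes plus a manual
-- append-then-trim-trailing-comma loop by one table-driven pass with a comma join (objective: simpler).

-- ===== PORT A =====
-- literal transliteration of A: six replaces, then a char loop building "c," pieces, then str_num[:-1]
def abc2num (str : String) : String :=
  let s1 := PySem.Chars.replace str.toList ['A'] ['1']
  let s2 := PySem.Chars.replace s1 ['B'] ['2']
  let s3 := PySem.Chars.replace s2 ['C'] ['3']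
  let s4 := PySem.Chars.replace s3 ['D'] ['4']
  let s5 := PySem.Chars.replace s4 ['E'] ['5']
  let s6 := PySem.Chars.replace s5 ['F'] ['6']
  let str_num := s6.foldl (fun acc c => acc ++ [c] ++ [',']) []
  String.ofList (PySem.Chars.slice str_num none (some (-1)))

-- ===== PORT B =====
def abc2numTable : PySem.Dict Char Char :=
  (((((PySem.Dict.empty.insert 'A' '1').insert 'B' '2').insert 'C' '3').insert
      'D' '4').insert 'E' '5').insert 'F' '6'

-- literal transliteration of B: one pass, table lookup with default, comma join
def abc2num_alt (str : String) : String :=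
  String.ofList (PySem.Chars.join [','] (str.toList.map (fun c => [abc2numTable.getD c c])))

-- ===== PRECONDITION & SPEC =====
def Spec_abc2num (str : String) (out : String) : Prop := out = abc2num_alt str
instance (str : String) (out : String) : Decidable (Spec_abc2num str out) := by unfold Spec_abc2num; infer_instance

-- ===== CLAIM (what is proved, stated in full; the proofs are below) =====
def Claim_equal_abc2num : Prop := ∀ (str : String), Dom_abc2num str → Spec_abc2num str (abc2num str)

-- ===== LEMMAS AND PROOFS =====

-- single-char replace is a map
theorem replace_go_single (a b : Char) :
    ∀ (fuel : Nat) (l acc : List Char), l.length ≤ fuel →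
      PySem.Chars.replace.go [a] [b] fuel l acc
        = acc.reverse ++ l.map (fun c => if c = a then b else c) := by
  intro fuel
  induction fuel with
  | zero =>
    intro l acc h
    have : l = [] := List.eq_nil_of_length_eq_zero (Nat.le_zero.mp h)
    subst this
    rw [PySem.Chars.replace.go.eq_def]
    simp
  | succ n ih =>
    intro l acc h
    cases l with
    | nil => rw [PySem.Chars.replace.go.eq_def]; simp
    | cons c t =>
      have ht : t.length ≤ n := by simp at h; omega
      have hred : PySem.Chars.replace.go [a] [b] (n+1) (c :: t) acc
          = if a == c then PySem.Chars.replace.go [a] [b] n t (b :: acc)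
            else PySem.Chars.replace.go [a] [b] n t (c :: acc) := by
        rw [PySem.Chars.replace.go.eq_def]
        simp [List.isPrefixOf]
      rw [hred]
      by_cases hc : c = a
      · subst hc
        simp only [beq_self_eq_true, if_true]
        rw [ih t (b :: acc) ht]
        simp
      · have hbc : (a == c) = false := by
          simp only [beq_eq_false_iff_ne]
          exact fun h' => hc h'.symm
        rw [hbc]
        simp only [Bool.false_eq_true, if_false]
        rw [ih t (c :: acc) ht]
        simp [hc]

theorem replace_single (a b : Char) (l : List Char) :
    PySem.Chars.replace l [a] [b] = l.map (fun c => if c = a then b else c) := by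
  unfold PySem.Chars.replace
  simp only [List.isEmpty, Bool.false_eq_true, if_false]
  exact replace_go_single a b l.length l [] (le_refl _)

-- A's loop is a flatMap
theorem foldl_comma (l : List Char) :
    ∀ acc : List Char,
      l.foldl (fun acc c => acc ++ [c] ++ [',']) acc = acc ++ l.flatMap (fun c => [c, ',']) := by
  induction l with
  | nil => intro acc; simp
  | cons c t ih =>
    intro acc
    rw [List.foldl_cons, ih, List.flatMap_cons]
    simp

-- dropping the trailing comma of the flatMap gives the comma-join of singletons
theorem dropLast_flatMap_comma (l : List Char) :
    (l.flatMap (fun c => [c, ','])).dropLast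
      = PySem.Chars.join [','] (l.map (fun c => [c])) := by
  induction l with
  | nil => simp [PySem.Chars.join_nil]
  | cons c t ih =>
    cases t with
    | nil => simp [PySem.Chars.join_singleton]
    | cons d u =>
      have hne : List.flatMap (fun c => [c, ',']) (d :: u) ≠ [] := by simp
      calc (List.flatMap (fun c => [c, ',']) (c :: d :: u)).dropLast
          = [c, ','] ++ (List.flatMap (fun c => [c, ',']) (d :: u)).dropLast := by
            rw [List.flatMap_cons, List.dropLast_append_of_ne_nil hne]
        _ = [c, ','] ++ PySem.Chars.join [','] (List.map (fun c => [c]) (d :: u)) := by rw [ih]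
        _ = PySem.Chars.join [','] (List.map (fun c => [c]) (c :: d :: u)) := by
            simp only [List.map_cons]
            rw [PySem.Chars.join_cons_cons]
            simp

-- the six substitutions compose to the table lookup
theorem table_eq (c : Char) :
    abc2numTable.getD c c
      = (fun x => if x = 'F' then '6' else x)
        ((fun x => if x = 'E' then '5' else x)
        ((fun x => if x = 'D' then '4' else x)
        ((fun x => if x = 'C' then '3' else x)
        ((fun x => if x = 'B' then '2' else x)
        ((fun x => if x = 'A' then '1' else x) c))))) := by
  by_cases h1 : c = 'A'; · subst h1; decide
  by_cases h2 : c = 'B'; · subst h2; decide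
  by_cases h3 : c = 'C'; · subst h3; decide
  by_cases h4 : c = 'D'; · subst h4; decide
  by_cases h5 : c = 'E'; · subst h5; decide
  by_cases h6 : c = 'F'; · subst h6; decide
  simp only [abc2numTable, PySem.Dict.getD_insert, h1, h2, h3, h4, h5, h6, if_false]
  simp [PySem.Dict.getD, PySem.Dict.get?, PySem.Dict.empty]

-- ===== VERDICT (by name: the statement is the Claim_ definition above) =====
theorem abc2num_spec : Claim_equal_abc2num := by
  intro str _
  unfold Spec_abc2num abc2num abc2num_alt
  simp only [replace_single, List.map_map, foldl_comma, List.nil_append,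
    PySem.Chars.slice_eq_listSlice, PySem.List.slice_to_neg_one,
    dropLast_flatMap_comma, List.map_map]
  refine congrArg _ (congrArg _ (List.map_congr_left ?_))
  intro c _
  simp only [Function.comp_apply]
  rw [table_eq c]
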